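-- pv_equiv track=rewrite | github.com/PujanGupta/python-maths-functions | pythonarithmeticfunctions.py | primeCompositeInRange
-- ===== SOURCE A (Python) =====
-- def checkIfPrime(n):
--     prime = True
--     for i in range(2, n - 1):
--         if n % i == 0:
--             prime = False
--             break
--         else:
--             pass
--
--     if prime == True:
--         return "Prime"
--     elif prime == False:
--         return "Composite"
--
-- def primeCompositeInRange(rangeLower,rangeUpper):
--     composites = []
--     primes = []
--
--     for j in range(rangeLower,rangeUpper + 1):
--         status_J = checkIfPrime(j)
--         if status_J == "Prime":
--             primes.append(j)
--         elif status_J == "Composite":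
--             composites.append(j)
--
--     return({"primes":primes,"composites":composites})
-- ===== SOURCE B (Python) =====
-- def primeCompositeInRange(rangeLower, rangeUpper):
--     def isPrime(n):
--         # sqrt-bounded trial division; any n < 4 has no candidate divisor
--         # and is reported "prime", matching the original's classification
--         i = 2
--         while i * i <= n:
--             if n % i == 0:
--                 return False
--             i += 1
--         return True
--     nums = range(rangeLower, rangeUpper + 1)
--     return {"primes": [n for n in nums if isPrime(n)],
--             "composites": [n for n in nums if not isPrime(n)]}
-- ===== Notes on version B (the rewrite author's own statement) =====
-- stated objective: faster
-- what changed: Replaces the O(n) trial division over [2, n-2] per number with sqrt-bounded trial division, and builds the two lists by filtering the range instead of a branching accumulator loop.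
import Mathlib
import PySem

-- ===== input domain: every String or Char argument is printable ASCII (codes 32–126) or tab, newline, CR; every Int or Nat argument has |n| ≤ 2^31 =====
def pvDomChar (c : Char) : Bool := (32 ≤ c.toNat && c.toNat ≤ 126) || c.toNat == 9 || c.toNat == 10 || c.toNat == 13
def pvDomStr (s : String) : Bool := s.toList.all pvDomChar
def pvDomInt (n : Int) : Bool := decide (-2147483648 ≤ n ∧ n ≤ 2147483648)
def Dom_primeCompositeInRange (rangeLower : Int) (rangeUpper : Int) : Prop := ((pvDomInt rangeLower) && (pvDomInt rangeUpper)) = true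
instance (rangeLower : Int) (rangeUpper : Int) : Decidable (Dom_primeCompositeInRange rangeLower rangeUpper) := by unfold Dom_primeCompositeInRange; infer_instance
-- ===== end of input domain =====

-- B replaces A's per-number trial division over [2, n-2] by sqrt-bounded trial
-- division and builds the two lists by filtering the range (objective: faster).


-- ===== PORT A =====
-- the 'for i in range(2, n-1): if n % i == 0: prime=False; break' loop
def checkLoop (n : Int) : List Int → Bool
  | [] => true
  | i :: rest => if PySem.Int.mod n i == 0 then false else checkLoop n rest

def checkIfPrime (n : Int) : String :=
  if checkLoop n (PySem.List.pyRange 2 (n - 1) 1) then "Prime" else "Composite"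

def primeCompositeInRange (rangeLower : Int) (rangeUpper : Int) : List (String × List Int) :=
  let st := (PySem.List.pyRange rangeLower (rangeUpper + 1) 1).foldl
    (fun (acc : List Int × List Int) j =>
      let statusJ := checkIfPrime j
      if statusJ = "Prime" then (acc.1 ++ [j], acc.2)
      else if statusJ = "Composite" then (acc.1, acc.2 ++ [j])
      else acc)
    ([], [])
  [("primes", st.1), ("composites", st.2)]

-- ===== PORT B =====
-- 'while i * i <= n: if n % i == 0: return False; i += 1'; the 2 ≤ i
-- hypothesis only justifies termination, it never changes the computation
def altTrial (n : Int) (i : Int) (hi : 2 ≤ i) : Bool :=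
  if h : i * i ≤ n then
    if PySem.Int.mod n i == 0 then false else altTrial n (i + 1) (by omega)
  else true
termination_by (n + 1 - i * i).toNat
decreasing_by
  have h1 : i * i < (i + 1) * (i + 1) := by nlinarith
  omega

def altIsPrime (n : Int) : Bool := altTrial n 2 (by omega)

def primeCompositeInRange_alt (rangeLower : Int) (rangeUpper : Int) : List (String × List Int) :=
  let nums := PySem.List.pyRange rangeLower (rangeUpper + 1) 1
  [("primes", nums.filter (fun n => altIsPrime n)),
   ("composites", nums.filter (fun n => ¬ altIsPrime n))]

-- ===== PRECONDITION & SPEC =====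
def Spec_primeCompositeInRange (rangeLower : Int) (rangeUpper : Int) (out : List (String × List Int)) : Prop := out = primeCompositeInRange_alt rangeLower rangeUpper
instance (rangeLower : Int) (rangeUpper : Int) (out : List (String × List Int)) : Decidable (Spec_primeCompositeInRange rangeLower rangeUpper out) := by unfold Spec_primeCompositeInRange; infer_instance

-- ===== CLAIM (what is proved, stated in full; the proofs are below) =====
def Claim_equal_primeCompositeInRange : Prop := ∀ (rangeLower : Int) (rangeUpper : Int), Dom_primeCompositeInRange rangeLower rangeUpper → Spec_primeCompositeInRange rangeLower rangeUpper (primeCompositeInRange rangeLower rangeUpper)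

-- ===== LEMMAS AND PROOFS =====

theorem checkLoop_eq_all (n : Int) (l : List Int) :
    checkLoop n l = l.all (fun i => !(PySem.Int.mod n i == 0)) := by
  induction l with
  | nil => rfl
  | cons i rest ih => simp only [checkLoop, List.all_cons, ih]; split_ifs with h <;> simp_all

theorem altTrial_true_iff (n : Int) (i : Int) (hi : 2 ≤ i) :
    altTrial n i hi = true ↔ ∀ j : Int, i ≤ j → j * j ≤ n → PySem.Int.mod n j ≠ 0 := by
  fun_induction altTrial n i hi with
  | case1 i hi h hm =>
    simp only [beq_iff_eq] at hm
    simp only [Bool.false_eq_true, false_iff, not_forall]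
    exact ⟨i, le_refl i, h, fun hc => hc hm⟩
  | case2 i hi h hm ih =>
    simp only [beq_iff_eq] at hm
    rw [ih]
    constructor
    · intro hall j hj hjj
      rcases eq_or_lt_of_le hj with rfl | hlt
      · exact hm
      · exact hall j (by omega) hjj
    · intro hall j hj hjj
      exact hall j (by omega) hjj
  | case3 i hi h =>
    simp only [true_iff]
    intro j hj hjj
    exfalso
    have : i * i ≤ j * j := by nlinarith
    omega

theorem checkIfPrime_eq (n : Int) :
    checkIfPrime n = (if altIsPrime n then "Prime" else "Composite") := by
  have key : checkLoop n (PySem.List.pyRange 2 (n - 1) 1) = altIsPrime n := by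
    rw [Bool.eq_iff_iff, checkLoop_eq_all, altIsPrime, altTrial_true_iff]
    simp only [List.all_eq_true, PySem.List.mem_pyRange_one, Bool.not_eq_eq_eq_not,
      Bool.not_true, beq_eq_false_iff_ne, ne_eq, and_imp]
    constructor
    · intro hall j h2j hjj
      have h2 : 2 * j ≤ j * j := by nlinarith
      exact hall j h2j (by omega)
    · intro hall i h2i hilt hmod
      have hn4 : 4 ≤ n := by omega
      by_cases hii : i * i ≤ n
      · exact hall i h2i hii hmod
      · have hidvd : i ∣ n := (PySem.Int.mod_eq_zero_iff_dvd n i).mp hmod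
        obtain ⟨k, hk⟩ := hidvd
        have hk2 : 2 ≤ k := by nlinarith
        have hkk : k * k ≤ n := by nlinarith
        refine hall k hk2 hkk ?_
        exact (PySem.Int.mod_eq_zero_iff_dvd n k).mpr ⟨i, by linarith [hk, mul_comm i k]⟩
  rw [checkIfPrime, key]

theorem fold_eq_filters (l : List Int) (p c : List Int) :
    (l.foldl
      (fun (acc : List Int × List Int) j =>
        let statusJ := checkIfPrime j
        if statusJ = "Prime" then (acc.1 ++ [j], acc.2)
        else if statusJ = "Composite" then (acc.1, acc.2 ++ [j])
        else acc)
      (p, c)) =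
    (p ++ l.filter (fun n => altIsPrime n), c ++ l.filter (fun n => ¬ altIsPrime n)) := by
  induction l generalizing p c with
  | nil => simp
  | cons j rest ih =>
    simp only [List.foldl_cons, List.filter_cons]
    rw [checkIfPrime_eq j]
    rcases Bool.eq_false_or_eq_true (altIsPrime j) with hb | hb <;>
      simp [hb, ih, List.append_assoc]

-- ===== VERDICT (by name: the statement is the Claim_ definition above) =====
theorem primeCompositeInRange_spec : Claim_equal_primeCompositeInRange := by
  intro lo hi _
  show primeCompositeInRange lo hi = primeCompositeInRange_alt lo hi
  rw [primeCompositeInRange, primeCompositeInRange_alt, fold_eq_filters]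
  simp
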